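-- pv_equiv track=rewrite | github.com/sevensuii/holamundo | Python/Trim3/UT3_1_Matrices/main.py | matrizCorrecta
-- ===== SOURCE A (Python) =====
-- def matrizCorrecta(mat):    # Nos dice si una matriz es correcta
--     filas = len(mat)
--     columnas = len(mat[0])
--     correcto = True
--     i = 1
--     while i < filas and correcto:
--         correcto = (len(mat[i]) == columnas)
--         i += 1
--     return correcto
-- ===== SOURCE B (Python) =====
-- def matrizCorrecta(mat):
--     # Distinct-lengths check: the matrix is correct iff all rows share one length.
--     return len({len(fila) for fila in mat}) == 1
-- ===== Notes on version B (the rewrite author's own statement) =====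
-- stated objective: simpler
-- what changed: Replaces the index-driven while loop with early-exit flag by a set comprehension of row lengths tested for cardinality 1.
import Mathlib
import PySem

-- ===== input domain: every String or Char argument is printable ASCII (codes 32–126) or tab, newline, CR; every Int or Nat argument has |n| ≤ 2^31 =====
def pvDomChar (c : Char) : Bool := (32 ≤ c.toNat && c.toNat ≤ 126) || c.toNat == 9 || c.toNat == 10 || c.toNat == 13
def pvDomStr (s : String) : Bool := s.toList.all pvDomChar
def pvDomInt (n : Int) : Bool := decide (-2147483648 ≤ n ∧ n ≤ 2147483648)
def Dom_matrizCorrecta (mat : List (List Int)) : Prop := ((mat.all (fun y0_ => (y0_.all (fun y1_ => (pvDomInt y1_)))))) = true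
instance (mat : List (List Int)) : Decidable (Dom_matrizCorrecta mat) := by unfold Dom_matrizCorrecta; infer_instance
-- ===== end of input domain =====

-- B replaces A's index-driven while loop (early-exit flag) by a set of row lengths
-- tested for cardinality 1; equivalence of the RETURN value on nonempty matrices.

-- ===== PORT A =====
-- while i < filas and correcto: correcto = (len(mat[i]) == columnas); i += 1
-- fuel = filas bounds the loop; inside the loop i < filas so getD never uses its default.
def matrizCorrectaLoop (mat : List (List Int)) (filas columnas : Nat)
    (correcto : Bool) (i : Nat) : Nat → Bool
  | 0 => correcto
  | fuel + 1 =>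
    if i < filas && correcto then
      matrizCorrectaLoop mat filas columnas ((mat.getD i []).length == columnas) (i + 1) fuel
    else correcto

def matrizCorrecta (mat : List (List Int)) : Bool :=
  let filas := mat.length
  let columnas := ((PySem.List.pyGet? mat (0 : Int)).getD []).length  -- len(mat[0]); Pre_ excludes []
  matrizCorrectaLoop mat filas columnas true 1 filas

-- ===== PORT B =====
def matrizCorrecta_alt (mat : List (List Int)) : Bool :=
  PySem.Set.len (PySem.Set.ofList (mat.map (fun fila => (fila.length : Int)))) == 1

-- ===== PRECONDITION & SPEC =====
-- A evaluates mat[0]: it raises IndexError exactly on the empty matrix.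
def Pre_matrizCorrecta (mat : List (List Int)) : Prop := mat ≠ []
instance (mat : List (List Int)) : Decidable (Pre_matrizCorrecta mat) := by unfold Pre_matrizCorrecta; infer_instance
def pvWitness_matrizCorrecta : List (List Int) := [[1, 2], [3, 4]]

def Spec_matrizCorrecta (mat : List (List Int)) (out : Bool) : Prop := out = matrizCorrecta_alt mat
instance (mat : List (List Int)) (out : Bool) : Decidable (Spec_matrizCorrecta mat out) := by unfold Spec_matrizCorrecta; infer_instance

-- ===== CLAIM =====
def Claim_equal_matrizCorrecta : Prop := ∀ (mat : List (List Int)), Dom_matrizCorrecta mat → Pre_matrizCorrecta mat → Spec_matrizCorrecta mat (matrizCorrecta mat)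

-- ===== LEMMAS AND PROOFS =====
lemma loop_false (mat : List (List Int)) (filas columnas i fuel : Nat) :
    matrizCorrectaLoop mat filas columnas false i fuel = false := by
  cases fuel <;> simp [matrizCorrectaLoop]

lemma loop_all (mat : List (List Int)) (columnas : Nat) :
    ∀ (fuel i : Nat), mat.length ≤ i + fuel →
    matrizCorrectaLoop mat mat.length columnas true i fuel
      = (mat.drop i).all (fun f => f.length == columnas) := by
  intro fuel
  induction fuel with
  | zero =>
    intro i h
    simp only [Nat.add_zero] at h
    simp [matrizCorrectaLoop, List.drop_eq_nil_of_le h]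
  | succ n ih =>
    intro i h
    by_cases hi : i < mat.length
    · have hdrop : mat.drop i = mat[i] :: mat.drop (i + 1) :=
        List.drop_eq_getElem_cons hi
      have hgetD : mat.getD i [] = mat[i] := List.getD_eq_getElem mat [] hi
      by_cases hc : mat[i].length = columnas
      · simp only [matrizCorrectaLoop, hi, hgetD]
        simp only [hc, beq_self_eq_true, Bool.and_true, if_pos (by simpa using hi)]
        rw [ih (i + 1) (by omega), hdrop, List.all_cons, hc]
        simp
      · simp only [matrizCorrectaLoop, hi, hgetD]
        have : (mat[i].length == columnas) = false := by simp [hc]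
        simp only [this, Bool.and_true, if_pos (by simpa using hi)]
        rw [loop_false, hdrop, List.all_cons, this]
        simp
    · have : mat.drop i = [] := List.drop_eq_nil_of_le (by omega)
      simp [matrizCorrectaLoop, hi, this]

lemma setLen_one_iff (a : Int) (l : List Int) :
    (PySem.Set.len (PySem.Set.ofList (a :: l)) == 1) = l.all (fun x => x == a) := by
  induction l with
  | nil =>
    simp [PySem.Set.ofList_eq_foldl, List.foldl, PySem.Set.add, PySem.Set.contains,
      PySem.Set.empty, PySem.Set.len]
  | cons b t ih =>
    by_cases hba : b = a
    · subst hba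
      simp only [List.all_cons, beq_self_eq_true, Bool.true_and]
      rw [← ih]
      have : PySem.Set.ofList (b :: b :: t) = PySem.Set.ofList (b :: t) := by
        simp [PySem.Set.ofList_eq_foldl, List.foldl, PySem.Set.add, PySem.Set.contains,
          PySem.Set.empty]
      rw [this]
    · -- both a and b are distinct members of the set, so its length is ≥ 2
      have hmem_a : a ∈ PySem.Set.ofList (a :: b :: t) := by
        rw [PySem.Set.mem_ofList]; simp
      have hmem_b : b ∈ PySem.Set.ofList (a :: b :: t) := by
        rw [PySem.Set.mem_ofList]; simp
      have hnd : (PySem.Set.ofList (a :: b :: t)).Nodup := PySem.Set.nodup_ofList _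
      have hlen : 2 ≤ (PySem.Set.ofList (a :: b :: t)).length := by
        have : [b, a] ⊆ PySem.Set.ofList (a :: b :: t) := by
          intro x hx; simp at hx; rcases hx with h | h <;> subst h <;> assumption
        have hsub : [b, a].Subperm (PySem.Set.ofList (a :: b :: t)) :=
          (List.nodup_cons.mpr ⟨by simpa using hba, List.nodup_singleton a⟩).subperm this
        simpa using hsub.length_le
      have hne : (PySem.Set.len (PySem.Set.ofList (a :: b :: t)) == 1) = false := by
        simp only [PySem.Set.len, beq_eq_false_iff_ne, ne_eq]
        omega
      rw [hne]
      simp [hba]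

lemma alt_cons (r : List Int) (rs : List (List Int)) :
    matrizCorrecta_alt (r :: rs) = rs.all (fun f => f.length == r.length) := by
  unfold matrizCorrecta_alt
  rw [List.map_cons, setLen_one_iff]
  induction rs with
  | nil => rfl
  | cons f fs ih =>
    rw [List.map_cons, List.all_cons, List.all_cons, ih]
    have : ((f.length : Int) == (r.length : Int)) = (f.length == r.length) := by
      simp
    rw [this]

-- ===== VERDICT =====
theorem matrizCorrecta_spec : Claim_equal_matrizCorrecta := by
  intro mat _ hpre
  unfold Spec_matrizCorrecta
  cases mat with
  | nil => exact absurd rfl hpre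
  | cons r rs =>
    unfold matrizCorrecta
    rw [alt_cons]
    have h0 : PySem.List.pyGet? (r :: rs) (0 : Int) = some r := by
      simp [PySem.List.pyGet?, PySem.List.pyIdx?]
    simp only [h0, Option.getD_some]
    rw [loop_all (r :: rs) r.length (r :: rs).length 1 (by simp)]
    simp
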